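-- pv_equiv track=rewrite | github.com/matt-hayden/VideoClipSplitter | videoclipsplitter/splits_tsv.py | parse
-- ===== SOURCE A (Python) =====
-- def parse(rows, NonePlaceholder=None):
-- 	last_end = NonePlaceholder
-- 	for order, (start, label, end) in enumerate(rows):
-- 		try:
-- 			mystart = int(start)
-- 		except:
-- 			mystart = last_end
-- 		try:
-- 			myend = int(end) or NonePlaceholder
-- 		except:
-- 			myend = NonePlaceholder
-- 		yield mystart, myend
-- 		last_end = myend
-- ===== SOURCE B (Python) =====
-- def parse(rows, NonePlaceholder=None):
-- 	rows = list(rows)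
-- 	# pass 1: table of resolved ends
-- 	ends = []
-- 	for _, _, end in rows:
-- 		try:
-- 			ends.append(int(end) or NonePlaceholder)
-- 		except:
-- 			ends.append(NonePlaceholder)
-- 	# pass 2: resolve starts against the shifted end table
-- 	for (start, _, _), prev_end, myend in zip(rows, [NonePlaceholder] + ends[:-1], ends):
-- 		try:
-- 			mystart = int(start)
-- 		except:
-- 			mystart = prev_end
-- 		yield mystart, myend
-- ===== Notes on version B (the rewrite author's own statement) =====
-- stated objective: alternative
-- what changed: Replaces A's single pass with a running last_end accumulator by a two-pass scheme: first materialize a table of resolved ends, then resolve each start by zipping the rows with the shifted end table.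
import Mathlib
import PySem

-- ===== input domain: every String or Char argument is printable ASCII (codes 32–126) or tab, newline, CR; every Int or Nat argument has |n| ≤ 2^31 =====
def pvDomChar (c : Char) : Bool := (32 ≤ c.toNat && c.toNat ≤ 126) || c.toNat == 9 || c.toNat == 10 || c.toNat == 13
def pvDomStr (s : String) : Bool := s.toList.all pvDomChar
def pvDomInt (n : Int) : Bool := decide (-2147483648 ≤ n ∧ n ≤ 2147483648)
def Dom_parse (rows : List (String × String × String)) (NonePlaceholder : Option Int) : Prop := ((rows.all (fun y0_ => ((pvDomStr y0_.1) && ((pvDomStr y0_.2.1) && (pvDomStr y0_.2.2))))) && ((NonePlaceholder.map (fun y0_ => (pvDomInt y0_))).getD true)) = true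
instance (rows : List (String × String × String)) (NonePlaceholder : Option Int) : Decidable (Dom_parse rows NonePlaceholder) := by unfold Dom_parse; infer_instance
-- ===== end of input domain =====

-- ===== PORT A =====
def parseA_go (rows : List (String × String × String)) (lastEnd ph : Option Int) : List (Option Int × Option Int) :=
  match rows with
  | [] => []
  | (start, _, e) :: t =>
    -- try: mystart = int(start) except: mystart = last_end
    let mystart : Option Int := match PySem.Int.ofStr? start with
      | some v => some v
      | none => lastEnd
    -- try: myend = int(end) or NonePlaceholder except: myend = NonePlaceholder
    let myend : Option Int := match PySem.Int.ofStr? e with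
      | some v => if v = 0 then ph else some v
      | none => ph
    (mystart, myend) :: parseA_go t myend ph

def parse (rows : List (String × String × String)) (NonePlaceholder : Option Int) : List (Option Int × Option Int) :=
  parseA_go rows NonePlaceholder NonePlaceholder

-- ===== PORT B =====
-- B replaces A's single pass with a running last_end accumulator by two passes: a table of resolved ends, then a zip of the rows with the shifted table (objective: alternative decomposition).
-- pass 1 helper: int(end) or NonePlaceholder, except -> NonePlaceholder
def endOfB (e : String) (ph : Option Int) : Option Int :=
  match PySem.Int.ofStr? e with
  | some v => if v = 0 then ph else some v
  | none => ph

def parse_alt (rows : List (String × String × String)) (NonePlaceholder : Option Int) : List (Option Int × Option Int) :=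
  let ends := rows.map (fun r => endOfB r.2.2 NonePlaceholder)
  let prevs := NonePlaceholder :: ends.dropLast      -- [NonePlaceholder] + ends[:-1]
  (rows.zip (prevs.zip ends)).map (fun p =>
    ((match PySem.Int.ofStr? p.1.1 with
      | some v => some v
      | none => p.2.1), p.2.2))

-- ===== PRECONDITION & SPEC =====
def Spec_parse (rows : List (String × String × String)) (NonePlaceholder : Option Int) (out : List (Option Int × Option Int)) : Prop := out = parse_alt rows NonePlaceholder
instance (rows : List (String × String × String)) (NonePlaceholder : Option Int) (out : List (Option Int × Option Int)) : Decidable (Spec_parse rows NonePlaceholder out) := by unfold Spec_parse; infer_instance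

-- ===== CLAIM (what is proved, stated in full; the proofs are below) =====
def Claim_equal_parse : Prop := ∀ (rows : List (String × String × String)) (NonePlaceholder : Option Int), Dom_parse rows NonePlaceholder → Spec_parse rows NonePlaceholder (parse rows NonePlaceholder)

-- ===== LEMMAS AND PROOFS =====
theorem zip_shift {a : Type} (x b : a) (t : List a) :
    ((x :: (b :: t).dropLast).zip (b :: t)) = (x, b) :: ((b :: t.dropLast).zip t) := by
  cases t <;> simp

theorem parseA_go_eq (rows : List (String × String × String)) (lastEnd ph : Option Int) :
    parseA_go rows lastEnd ph =
      (rows.zip ((lastEnd :: (rows.map (fun r => endOfB r.2.2 ph)).dropLast).zip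
        (rows.map (fun r => endOfB r.2.2 ph)))).map (fun p =>
        ((match PySem.Int.ofStr? p.1.1 with
          | some v => some v
          | none => p.2.1), p.2.2)) := by
  induction rows generalizing lastEnd with
  | nil => simp [parseA_go]
  | cons r t ih =>
    obtain ⟨s, lab, e⟩ := r
    rw [List.map_cons, zip_shift, List.zip_cons_cons, List.map_cons, parseA_go, ih]
    rfl

-- ===== VERDICT (by name: the statement is the Claim_ definition above) =====
theorem parse_spec : Claim_equal_parse := by
  intro rows ph _
  unfold Spec_parse parse parse_alt
  exact parseA_go_eq rows ph ph
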